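-- pv_equiv track=rewrite | github.com/turgaybulut/HybriTE | scripts/generate_graphs.py | _create_region_bins_indices
-- ===== SOURCE A (Python) =====
-- def _create_region_bins_indices(
--     length: int, num_bins: int, offset: int
-- ) -> list[tuple[int, int]]:
--     if num_bins <= 0:
--         return []
--
--     if length == 0:
--         return [(offset, offset) for _ in range(num_bins)]
--
--     bin_size = max(1, length // num_bins)
--     bins = []
--     for i in range(num_bins):
--         start = i * bin_size
--         end = start + bin_size if i < num_bins - 1 else length
--         bins.append((offset + start, offset + end))
--     return bins
-- ===== SOURCE B (Python) =====
-- def _create_region_bins_indices(length, num_bins, offset):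
--     if num_bins <= 0:
--         return []
--     if length == 0:
--         return [(offset, offset)] * num_bins
--     bin_size = max(1, length // num_bins)
--
--     def one_bin(i):
--         start = offset + i * bin_size
--         end = offset + length if i == num_bins - 1 else start + bin_size
--         return (start, end)
--
--     def build(lo, hi):
--         # divide and conquer over the index range [lo, hi)
--         if hi - lo <= 1:
--             return [one_bin(lo)] if lo < hi else []
--         mid = (lo + hi) // 2
--         return build(lo, mid) + build(mid, hi)
--
--     return build(0, num_bins)
-- ===== Notes on version B (the rewrite author's own statement) =====
-- stated objective: alternative
-- what changed: B replaces A's linear index loop by a divide-and-conquer recursion that binary-splits the index range [0, num_bins) and emits one bin per leaf, concatenating the two halves.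
import Mathlib
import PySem

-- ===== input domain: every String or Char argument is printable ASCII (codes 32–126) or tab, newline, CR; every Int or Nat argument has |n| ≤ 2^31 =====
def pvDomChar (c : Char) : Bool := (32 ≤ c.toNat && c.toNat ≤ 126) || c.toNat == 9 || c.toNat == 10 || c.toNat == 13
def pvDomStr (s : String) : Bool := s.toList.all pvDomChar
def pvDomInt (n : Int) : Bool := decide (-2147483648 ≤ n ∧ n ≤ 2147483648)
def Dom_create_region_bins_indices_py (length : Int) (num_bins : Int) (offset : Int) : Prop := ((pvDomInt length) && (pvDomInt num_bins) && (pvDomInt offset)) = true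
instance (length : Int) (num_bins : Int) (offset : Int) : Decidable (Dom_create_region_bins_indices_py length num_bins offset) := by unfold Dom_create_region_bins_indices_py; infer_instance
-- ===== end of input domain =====

-- B replaces A's linear index loop by a divide-and-conquer recursion that binary-splits
-- the index range and emits one bin per leaf (objective: alternative decomposition).

-- ===== PORT A =====
def create_region_bins_indices_py (length : Int) (num_bins : Int) (offset : Int) : List (Int × Int) :=
  if num_bins ≤ 0 then []
  else if length = 0 then
    (PySem.List.pyRange 0 num_bins 1).map (fun _ => (offset, offset))
  else
    let bin_size := max 1 (PySem.Int.floordiv length num_bins)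
    (PySem.List.pyRange 0 num_bins 1).foldl (fun bins i =>
      let start := i * bin_size
      let e := if i < num_bins - 1 then start + bin_size else length
      bins ++ [(offset + start, offset + e)]) []

-- ===== PORT B =====
-- Source B's nested `build(lo, hi)`: indices lo, hi always lie in [0, num_bins] here, so they
-- are carried as Nat and Python's (lo+hi)//2 on nonnegative ints is exactly Nat division.
def pvBuild (bin : Nat → Int × Int) (lo hi : Nat) : List (Int × Int) :=
  if hi - lo ≤ 1 then (if lo < hi then [bin lo] else [])
  else
    let mid := (lo + hi) / 2
    pvBuild bin lo mid ++ pvBuild bin mid hi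
termination_by hi - lo
decreasing_by all_goals omega

def create_region_bins_indices_py_alt (length : Int) (num_bins : Int) (offset : Int) : List (Int × Int) :=
  if num_bins ≤ 0 then []
  else if length = 0 then
    List.replicate num_bins.toNat (offset, offset)
  else
    let bin_size := max 1 (PySem.Int.floordiv length num_bins)
    let one_bin : Nat → Int × Int := fun i =>
      let start := offset + (i : Int) * bin_size
      let e := if (i : Int) = num_bins - 1 then offset + length else start + bin_size
      (start, e)
    pvBuild one_bin 0 num_bins.toNat

-- ===== PRECONDITION & SPEC =====
def Spec_create_region_bins_indices_py (length : Int) (num_bins : Int) (offset : Int) (out : List (Int × Int)) : Prop := out = create_region_bins_indices_py_alt length num_bins offset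
instance (length : Int) (num_bins : Int) (offset : Int) (out : List (Int × Int)) : Decidable (Spec_create_region_bins_indices_py length num_bins offset out) := by unfold Spec_create_region_bins_indices_py; infer_instance

-- ===== CLAIM (what is proved, stated in full; the proofs are below) =====
def Claim_equal_create_region_bins_indices_py : Prop := ∀ (length : Int) (num_bins : Int) (offset : Int), Dom_create_region_bins_indices_py length num_bins offset → Spec_create_region_bins_indices_py length num_bins offset (create_region_bins_indices_py length num_bins offset)

-- ===== LEMMAS AND PROOFS =====

-- The divide-and-conquer build is the map of the bin function over the index interval.
theorem pvBuild_eq_map (bin : Nat → Int × Int) (lo hi : Nat) :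
    pvBuild bin lo hi = (List.range' lo (hi - lo)).map bin := by
  induction lo, hi using pvBuild.induct with
  | case1 lo hi h hlt =>
      rw [pvBuild]
      have h1 : hi - lo = 1 := by omega
      simp [hlt, h1]
  | case2 lo hi h hlt =>
      rw [pvBuild]
      have h0 : hi - lo = 0 := by omega
      simp [hlt, h0]
  | case3 lo hi h mid ih1 ih2 =>
      rw [pvBuild]
      simp only [if_neg h]
      rw [ih1, ih2, ← List.map_append]
      have hmid : mid = (lo + hi) / 2 := rfl
      have hm : mid = lo + (mid - lo) := by omega
      rw [show (List.range' mid (hi - mid)) = List.range' (lo + (mid - lo)) (hi - mid) from by rw [← hm]]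
      have hsplit : List.range' lo (mid - lo) ++ List.range' (lo + (mid - lo)) (hi - mid)
          = List.range' lo ((mid - lo) + (hi - mid)) := by
        simpa using List.range'_append lo (mid - lo) (hi - mid) 1
      rw [hsplit]
      have heq : (mid - lo) + (hi - mid) = hi - lo := by omega
      rw [heq]

-- A's append-loop is a map over the index range.
theorem portA_else_eq_map (l n off bs : Int) :
    (PySem.List.pyRange 0 n 1).foldl (fun bins i =>
      let start := i * bs
      let e := if i < n - 1 then start + bs else l
      bins ++ [(off + start, off + e)]) []
    = (PySem.List.pyRange 0 n 1).map
        (fun i => (off + i * bs, off + if i < n - 1 then i * bs + bs else l)) := by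
  simpa using PySem.List.foldl_append_singleton_eq_map
    (f := fun i => (off + i * bs, off + if i < n - 1 then i * bs + bs else l))
    (l := PySem.List.pyRange 0 n 1) (acc := [])

-- ===== VERDICT (by name: the statement is the Claim_ definition above) =====
theorem create_region_bins_indices_py_spec : Claim_equal_create_region_bins_indices_py := by
  intro l n off _
  unfold Spec_create_region_bins_indices_py create_region_bins_indices_py create_region_bins_indices_py_alt
  by_cases hn : n ≤ 0
  · simp [hn]
  · simp only [if_neg hn]
    by_cases hl : l = 0
    · simp [hl, PySem.List.pyRange_one, Function.comp_def, List.map_const']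
    · simp only [if_neg hl]
      rw [portA_else_eq_map, pvBuild_eq_map]
      set bs := max 1 (PySem.Int.floordiv l n) with hbs
      have hn' : 0 < n := lt_of_not_ge hn
      apply List.ext_getElem
      · simp [PySem.List.length_pyRange_one]
      · intro k h1 h2
        have hk : k < n.toNat := by
          simpa [PySem.List.length_pyRange_one] using h1
        simp only [List.getElem_map, PySem.List.getElem_pyRange_one, List.getElem_range',
          zero_add, Nat.sub_zero]
        by_cases hlast : k + 1 < n.toNat
        · have hc1 : ((k:Int)) < n - 1 := by omega
          have hc2 : ¬ ((k : Int) = n - 1) := by omega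
          simp [hc1, hc2, add_assoc]
        · have hc1 : ¬ (((k:Int)) < n - 1) := by omega
          have hc2 : (k : Int) = n - 1 := by omega
          simp [hc1, hc2]
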